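-- pv_equiv track=rewrite | github.com/msandipan/Documents | utils/helper_func.py | match_samples
-- ===== SOURCE A (Python) =====
-- def match_samples(length,pos,lim):
--
--     mtchd = []
--     xlim,ylim,zlim = lim
--     for p in range(0, len(pos)):
--         for j in range(0, len(pos)):
--             if (abs(pos[p][0] - pos[j][0]) < xlim) and (abs(pos[p][1] - pos[j][1]) < ylim) and (abs(pos[p][2] - pos[j][2]) < zlim):
--                 mtchd.append([length+p,length+j])
--     return mtchd
-- ===== SOURCE B (Python) =====
-- def match_samples(length, pos, lim):
--     xlim, ylim, zlim = lim
--     if xlim <= 0 or ylim <= 0 or zlim <= 0: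
--         return []
--     # bucket each point index by its grid cell (cell size = the limits)
--     cells = {}
--     for i, pt in enumerate(pos):
--         key = (pt[0] // xlim, pt[1] // ylim, pt[2] // zlim)
--         cells.setdefault(key, []).append(i)
--     out = []
--     for p, pt in enumerate(pos):
--         cx, cy, cz = pt[0] // xlim, pt[1] // ylim, pt[2] // zlim
--         cand = []
--         for dx in (-1, 0, 1):
--             for dy in (-1, 0, 1):
--                 for dz in (-1, 0, 1):
--                     cand.extend(cells.get((cx + dx, cy + dy, cz + dz), ()))
--         cand.sort()
--         for j in cand:
--             q = pos[j]
--             if abs(pt[0] - q[0]) < xlim and abs(pt[1] - q[1]) < ylim and abs(pt[2] - q[2]) < zlim: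
--                 out.append([length + p, length + j])
--     return out
-- ===== Notes on version B (the rewrite author's own statement) =====
-- stated objective: alternative
-- what changed: Replaces the all-pairs double loop with spatial hashing: points are bucketed once into grid cells of size (xlim,ylim,zlim), each point only tests the points of its 27 neighbouring cells (candidates sorted to keep A's j-ascending order), with an early [] return when any limit is nonpositive.
import Mathlib
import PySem

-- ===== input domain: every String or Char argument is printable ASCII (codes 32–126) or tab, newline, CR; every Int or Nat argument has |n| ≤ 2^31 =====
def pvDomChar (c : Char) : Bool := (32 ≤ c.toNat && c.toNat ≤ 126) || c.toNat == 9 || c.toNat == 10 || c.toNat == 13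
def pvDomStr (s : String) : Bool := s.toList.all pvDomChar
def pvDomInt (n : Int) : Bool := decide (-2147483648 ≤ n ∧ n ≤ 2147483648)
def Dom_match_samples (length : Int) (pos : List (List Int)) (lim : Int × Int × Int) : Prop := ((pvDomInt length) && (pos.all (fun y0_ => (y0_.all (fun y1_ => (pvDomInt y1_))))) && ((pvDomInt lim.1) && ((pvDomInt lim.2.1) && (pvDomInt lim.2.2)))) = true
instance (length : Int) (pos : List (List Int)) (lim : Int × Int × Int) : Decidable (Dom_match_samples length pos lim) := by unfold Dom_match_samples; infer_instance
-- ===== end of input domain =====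

-- B replaces A's all-pairs double loop by spatial grid bucketing (cell size = the limits;
-- only the 27 neighbouring cells of each point are scanned, candidates sorted to keep A's order).

-- the triple-axis closeness test both Pythons write inline
def pvClose (lim : Int × Int × Int) (a b : List Int) : Bool :=
  decide (|PySem.List.pyGetD a 0 0 - PySem.List.pyGetD b 0 0| < lim.1) &&
  decide (|PySem.List.pyGetD a 1 0 - PySem.List.pyGetD b 1 0| < lim.2.1) &&
  decide (|PySem.List.pyGetD a 2 0 - PySem.List.pyGetD b 2 0| < lim.2.2)

-- ===== PORT A =====
def match_samples (length : Int) (pos : List (List Int)) (lim : Int × Int × Int) : List (List Int) :=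
  let n : Int := (pos.length : Int)
  (PySem.List.pyRange 0 n 1).foldl (fun mtchd p =>
    (PySem.List.pyRange 0 n 1).foldl (fun mtchd j =>
      if pvClose lim (PySem.List.pyGetD pos p []) (PySem.List.pyGetD pos j []) then
        mtchd ++ [[length + p, length + j]]
      else mtchd) mtchd) []

-- ===== PORT B =====
-- grid cell of a point, cell size (xlim, ylim, zlim)
def pvCell (lim : Int × Int × Int) (pt : List Int) : Int × Int × Int :=
  (PySem.Int.floordiv (PySem.List.pyGetD pt 0 0) lim.1,
   PySem.Int.floordiv (PySem.List.pyGetD pt 1 0) lim.2.1,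
   PySem.Int.floordiv (PySem.List.pyGetD pt 2 0) lim.2.2)

-- cells = {}; for i, pt in enumerate(pos): cells.setdefault(cell(pt), []).append(i)
def pvBuildCells (lim : Int × Int × Int) (pos : List (List Int)) :
    PySem.Dict (Int × Int × Int) (List Int) :=
  (PySem.List.enumerate pos).foldl
    (fun d ip => d.modify (pvCell lim ip.2) [] (fun l => l ++ [ip.1])) PySem.Dict.empty

def pvOffs : List Int := [-1, 0, 1]

-- the three nested neighbour-offset loops gathering candidate indices
def pvCand (cells : PySem.Dict (Int × Int × Int) (List Int)) (c : Int × Int × Int) : List Int :=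
  pvOffs.foldl (fun cand dx =>
    pvOffs.foldl (fun cand dy =>
      pvOffs.foldl (fun cand dz =>
        cand ++ cells.getD (c.1 + dx, c.2.1 + dy, c.2.2 + dz) []) cand) cand) []

def match_samples_alt (length : Int) (pos : List (List Int)) (lim : Int × Int × Int) : List (List Int) :=
  if lim.1 ≤ 0 ∨ lim.2.1 ≤ 0 ∨ lim.2.2 ≤ 0 then []
  else
    let cells := pvBuildCells lim pos
    (PySem.List.enumerate pos).foldl (fun out pp =>
      let cand := PySem.List.sorted (pvCand cells (pvCell lim pp.2)) (fun x => x) false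
      cand.foldl (fun out j =>
        if pvClose lim pp.2 (PySem.List.pyGetD pos j []) then
          out ++ [[length + pp.1, length + j]]
        else out) out) []

-- ===== PRECONDITION & SPEC =====
-- Pre_ is exactly where A returns: every point must carry each coordinate that A's
-- short-circuited axis tests reach (index 0 always; index 1 when xlim > 0; index 2 when
-- also ylim > 0) — on any other input A raises IndexError.
def Pre_match_samples (length : Int) (pos : List (List Int)) (lim : Int × Int × Int) : Prop :=
  if lim.1 ≤ 0 then ∀ pt ∈ pos, 1 ≤ pt.length
  else if lim.2.1 ≤ 0 then ∀ pt ∈ pos, 2 ≤ pt.length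
  else ∀ pt ∈ pos, 3 ≤ pt.length
instance (length : Int) (pos : List (List Int)) (lim : Int × Int × Int) : Decidable (Pre_match_samples length pos lim) := by unfold Pre_match_samples; infer_instance

def pvWitness_match_samples : Int × List (List Int) × (Int × Int × Int) :=
  (10, [[0, 0, 0], [1, 1, 1], [5, 5, 5]], (2, 2, 2))

def Spec_match_samples (length : Int) (pos : List (List Int)) (lim : Int × Int × Int) (out : List (List Int)) : Prop := out = match_samples_alt length pos lim
instance (length : Int) (pos : List (List Int)) (lim : Int × Int × Int) (out : List (List Int)) : Decidable (Spec_match_samples length pos lim out) := by unfold Spec_match_samples; infer_instance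

-- ===== CLAIM (what is proved, stated in full; the proofs are below) =====
def Claim_equal_match_samples : Prop := ∀ (length : Int) (pos : List (List Int)) (lim : Int × Int × Int), Dom_match_samples length pos lim → Pre_match_samples length pos lim → Spec_match_samples length pos lim (match_samples length pos lim)

-- ===== LEMMAS AND PROOFS =====

-- when some limit is nonpositive no pair is close
theorem pvClose_false {lim : Int × Int × Int} (h : lim.1 ≤ 0 ∨ lim.2.1 ≤ 0 ∨ lim.2.2 ≤ 0)
    (a b : List Int) : pvClose lim a b = false := by
  unfold pvClose
  rcases h with h | h | h
  · have hn : ¬ (|PySem.List.pyGetD a 0 0 - PySem.List.pyGetD b 0 0| < lim.1) := by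
      have := abs_nonneg (PySem.List.pyGetD a 0 0 - PySem.List.pyGetD b 0 0); omega
    simp [hn]
  · have hn : ¬ (|PySem.List.pyGetD a 1 0 - PySem.List.pyGetD b 1 0| < lim.2.1) := by
      have := abs_nonneg (PySem.List.pyGetD a 1 0 - PySem.List.pyGetD b 1 0); omega
    simp [hn]
  · have hn : ¬ (|PySem.List.pyGetD a 2 0 - PySem.List.pyGetD b 2 0| < lim.2.2) := by
      have := abs_nonneg (PySem.List.pyGetD a 2 0 - PySem.List.pyGetD b 2 0); omega
    simp [hn]

-- the 27 neighbour offsets, in the order B's nested loops visit them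
def pvOffs27 : List (Int × Int × Int) :=
  [(-1,-1,-1),(-1,-1,0),(-1,-1,1),(-1,0,-1),(-1,0,0),(-1,0,1),(-1,1,-1),(-1,1,0),(-1,1,1),
   (0,-1,-1),(0,-1,0),(0,-1,1),(0,0,-1),(0,0,0),(0,0,1),(0,1,-1),(0,1,0),(0,1,1),
   (1,-1,-1),(1,-1,0),(1,-1,1),(1,0,-1),(1,0,0),(1,0,1),(1,1,-1),(1,1,0),(1,1,1)]

theorem pvMem_offs27 {a b c : Int} (ha : -1 ≤ a ∧ a ≤ 1) (hb : -1 ≤ b ∧ b ≤ 1)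
    (hc : -1 ≤ c ∧ c ≤ 1) : (a, b, c) ∈ pvOffs27 := by
  obtain ⟨ha1, ha2⟩ := ha; obtain ⟨hb1, hb2⟩ := hb; obtain ⟨hc1, hc2⟩ := hc
  interval_cases a <;> interval_cases b <;> interval_cases c <;> decide

theorem pvCand_eq (cells : PySem.Dict (Int × Int × Int) (List Int)) (c : Int × Int × Int) :
    pvCand cells c
      = pvOffs27.flatMap (fun o => cells.getD (c.1 + o.1, c.2.1 + o.2.1, c.2.2 + o.2.2) []) := by
  simp [pvCand, pvOffs, pvOffs27, List.foldl, List.flatMap_cons, List.append_assoc]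

-- the bucket-building fold, generalized over the starting dict
theorem pvBuildCells_fold (lim : Int × Int × Int) (l : List (Int × List Int))
    (d : PySem.Dict (Int × Int × Int) (List Int)) (key : Int × Int × Int) :
    (l.foldl (fun d ip => d.modify (pvCell lim ip.2) [] (fun L => L ++ [ip.1])) d).getD key []
      = d.getD key [] ++ (l.filter (fun ip => pvCell lim ip.2 == key)).map (fun ip => ip.1) := by
  induction l generalizing d with
  | nil => simp
  | cons hd tl ih =>
    simp only [List.foldl_cons, ih, PySem.Dict.getD_modify, List.filter_cons]
    by_cases h : pvCell lim hd.2 = key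
    · simp [h, List.append_assoc]
    · simp [h, Ne.symm h]

-- a bucket holds exactly the indices whose point falls in that cell, in increasing order
theorem pvBucket_eq (lim : Int × Int × Int) (pos : List (List Int)) (key : Int × Int × Int) :
    (pvBuildCells lim pos).getD key []
      = (PySem.List.pyRange 0 (pos.length : Int) 1).filter
          (fun j => pvCell lim (PySem.List.pyGetD pos j []) == key) := by
  rw [pvBuildCells, pvBuildCells_fold]
  rw [PySem.List.enumerate_eq_map_pyRange (d := [])]
  simp [List.filter_map, Function.comp_def]

-- coordinates closer than the cell size land in floor cells at distance at most 1
theorem pvFdiv_close {a b x : Int} (hx : 0 < x) (h : |a - b| < x) :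
    PySem.Int.floordiv b x - 1 ≤ PySem.Int.floordiv a x ∧
    PySem.Int.floordiv a x ≤ PySem.Int.floordiv b x + 1 := by
  rw [PySem.Int.floordiv_eq_ediv_of_pos hx, PySem.Int.floordiv_eq_ediv_of_pos hx]
  rw [abs_lt] at h
  constructor
  · have h1 : b ≤ a + 1 * x := by omega
    have := Int.ediv_le_ediv hx h1
    rw [Int.add_mul_ediv_right _ _ (by omega : x ≠ 0)] at this
    omega
  · have h1 : a ≤ b + 1 * x := by omega
    have := Int.ediv_le_ediv hx h1
    rw [Int.add_mul_ediv_right _ _ (by omega : x ≠ 0)] at this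
    omega

-- the per-point row: sorted filtered candidates = filtered full index range
theorem pvRow_eq (lim : Int × Int × Int) (pos : List (List Int))
    (hx : 0 < lim.1) (hy : 0 < lim.2.1) (hz : 0 < lim.2.2) (pt : List Int) :
    (PySem.List.sorted (pvCand (pvBuildCells lim pos) (pvCell lim pt)) (fun x => x) false).filter
        (fun j => pvClose lim pt (PySem.List.pyGetD pos j []))
      = (PySem.List.pyRange 0 (pos.length : Int) 1).filter
          (fun j => pvClose lim pt (PySem.List.pyGetD pos j [])) := by
  set c := pvCell lim pt with hc
  set R := PySem.List.pyRange 0 (pos.length : Int) 1 with hR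
  set cand := pvCand (pvBuildCells lim pos) c with hcand
  set S := PySem.List.sorted cand (fun x => x) false with hS
  set q : Int → Bool := fun j => pvClose lim pt (PySem.List.pyGetD pos j []) with hqdef
  have hbucket : ∀ (key : Int × Int × Int) (j : Int),
      j ∈ (pvBuildCells lim pos).getD key [] ↔
        j ∈ R ∧ pvCell lim (PySem.List.pyGetD pos j []) = key := by
    intro key j
    rw [pvBucket_eq]
    simp [List.mem_filter, hR]
  have hRmap : R = (List.range pos.length).map (fun k : Nat => (k : Int)) := by
    rw [hR]; exact PySem.List.pyRange_zero_natCast pos.length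
  have hRnodup : R.Nodup := by
    rw [hRmap]
    exact List.nodup_range.map (fun a b h => by exact_mod_cast h)
  have hRlt : R.Pairwise (· < ·) := by
    rw [hRmap]
    exact List.pairwise_lt_range.map _ (fun a b h => by exact_mod_cast h)
  have hcand_nodup : cand.Nodup := by
    rw [hcand, pvCand_eq]
    rw [List.nodup_flatMap]
    constructor
    · intro o _
      rw [pvBucket_eq]
      exact hRnodup.filter _
    · have h27 : pvOffs27.Pairwise (· ≠ ·) := by decide
      refine h27.imp ?_
      intro o o' hne j hj1 hj2
      rw [hbucket] at hj1 hj2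
      apply hne
      have h1 := hj1.2
      have h2 := hj2.2
      rw [h1] at h2
      obtain ⟨o1, o2, o3⟩ := o
      obtain ⟨o1', o2', o3'⟩ := o'
      simp only [Prod.mk.injEq] at h2 ⊢
      omega
  have hperm : S.Perm cand := PySem.List.sorted_perm cand (fun x => x) false
  have hSnodup : S.Nodup := hperm.nodup_iff.mpr hcand_nodup
  have hSlt : S.Pairwise (· < ·) := by
    have hle : S.Pairwise (fun a b => a ≤ b) := PySem.List.sorted_pairwise cand (fun x => x)
    exact (hle.and hSnodup).imp (fun h => lt_of_le_of_ne h.1 h.2)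
  have hmem : ∀ j : Int, q j = true → (j ∈ cand ↔ j ∈ R) := by
    intro j hqj
    rw [hcand, pvCand_eq]
    constructor
    · intro hj
      rw [List.mem_flatMap] at hj
      obtain ⟨o, _, hj⟩ := hj
      exact ((hbucket _ j).mp hj).1
    · intro hj
      rw [List.mem_flatMap]
      set cj := pvCell lim (PySem.List.pyGetD pos j []) with hcj
      have hclose : |PySem.List.pyGetD pt 0 0 - PySem.List.pyGetD (PySem.List.pyGetD pos j []) 0 0| < lim.1 ∧
          |PySem.List.pyGetD pt 1 0 - PySem.List.pyGetD (PySem.List.pyGetD pos j []) 1 0| < lim.2.1 ∧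
          |PySem.List.pyGetD pt 2 0 - PySem.List.pyGetD (PySem.List.pyGetD pos j []) 2 0| < lim.2.2 := by
        have := hqj
        rw [hqdef] at this
        simp only [pvClose, Bool.and_eq_true, decide_eq_true_eq] at this
        exact ⟨this.1.1, this.1.2, this.2⟩
      have hb0 := pvFdiv_close hx (abs_sub_comm (PySem.List.pyGetD pt 0 0) _ ▸ hclose.1)
      have hb1 := pvFdiv_close hy (abs_sub_comm (PySem.List.pyGetD pt 1 0) _ ▸ hclose.2.1)
      have hb2 := pvFdiv_close hz (abs_sub_comm (PySem.List.pyGetD pt 2 0) _ ▸ hclose.2.2)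
      refine ⟨(cj.1 - c.1, cj.2.1 - c.2.1, cj.2.2 - c.2.2), ?_, ?_⟩
      · apply pvMem_offs27 <;> simp only [hc, hcj, pvCell] <;> constructor <;> omega
      · rw [hbucket]
        refine ⟨hj, ?_⟩
        rw [← hcj]
        obtain ⟨c1, c2, c3⟩ := cj
        simp only [Prod.mk.injEq]
        omega
  have hn1 : (S.filter q).Nodup := hSnodup.filter _
  have hn2 : (R.filter q).Nodup := hRnodup.filter _
  have hp : (S.filter q).Perm (R.filter q) := by
    rw [List.perm_ext_iff_of_nodup hn1 hn2]
    intro a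
    simp only [List.mem_filter]
    constructor
    · rintro ⟨haS, hq⟩
      exact ⟨(hmem a hq).mp (hperm.mem_iff.mp haS), hq⟩
    · rintro ⟨haR, hq⟩
      exact ⟨hperm.mem_iff.mpr ((hmem a hq).mpr haR), hq⟩
  exact hp.eq_of_pairwise (fun a b _ _ h1 h2 => le_antisymm h1 h2)
    (List.Pairwise.sublist List.filter_sublist (hSlt.imp le_of_lt))
    (List.Pairwise.sublist List.filter_sublist (hRlt.imp le_of_lt))

theorem pvMain_eq (length : Int) (pos : List (List Int)) (lim : Int × Int × Int) :
    match_samples length pos lim = match_samples_alt length pos lim := by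
  by_cases h0 : lim.1 ≤ 0 ∨ lim.2.1 ≤ 0 ∨ lim.2.2 ≤ 0
  · rw [match_samples_alt, if_pos h0]
    simp only [match_samples]
    have hin : ∀ (m : List (List Int)) (p : Int),
        List.foldl (fun mtchd j => if pvClose lim (PySem.List.pyGetD pos p []) (PySem.List.pyGetD pos j []) then mtchd ++ [[length + p, length + j]] else mtchd) m (PySem.List.pyRange 0 (pos.length : Int) 1) = m := by
      intro m p
      have h := PySem.List.foldl_congr_mem (PySem.List.pyRange 0 (pos.length : Int) 1)
        (fun mtchd j => if pvClose lim (PySem.List.pyGetD pos p []) (PySem.List.pyGetD pos j []) then mtchd ++ [[length + p, length + j]] else mtchd)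
        (fun acc _ => acc) m (fun acc x _ => by simp [pvClose_false h0])
      exact h.trans (PySem.List.foldl_ignore _ _)
    have hout := PySem.List.foldl_congr_mem (PySem.List.pyRange 0 (pos.length : Int) 1)
      (fun mtchd p => List.foldl (fun mtchd j => if pvClose lim (PySem.List.pyGetD pos p []) (PySem.List.pyGetD pos j []) then mtchd ++ [[length + p, length + j]] else mtchd) mtchd (PySem.List.pyRange 0 (pos.length : Int) 1))
      (fun acc _ => acc) [] (fun m p _ => hin m p)
    exact hout.trans (PySem.List.foldl_ignore _ _)
  · rw [match_samples_alt, if_neg h0]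
    simp only [not_or, not_le] at h0
    obtain ⟨hx, hy, hz⟩ := h0
    simp only [match_samples]
    have hA := PySem.List.foldl_congr_mem (PySem.List.pyRange 0 (pos.length : Int) 1)
      (fun mtchd p => List.foldl (fun mtchd j => if pvClose lim (PySem.List.pyGetD pos p []) (PySem.List.pyGetD pos j []) then mtchd ++ [[length + p, length + j]] else mtchd) mtchd (PySem.List.pyRange 0 (pos.length : Int) 1))
      (fun m p => m ++ (List.filter (fun j => pvClose lim (PySem.List.pyGetD pos p []) (PySem.List.pyGetD pos j [])) (PySem.List.pyRange 0 (pos.length : Int) 1)).map (fun j => [length + p, length + j]))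
      [] (fun acc p _ => PySem.List.foldl_append_if _ _ _ _)
    have hB := PySem.List.foldl_congr_mem (PySem.List.enumerate pos)
      (fun out pp => List.foldl (fun out j => if pvClose lim pp.2 (PySem.List.pyGetD pos j []) then out ++ [[length + pp.1, length + j]] else out) out (PySem.List.sorted (pvCand (pvBuildCells lim pos) (pvCell lim pp.2)) (fun x => x) false))
      (fun out pp => out ++ (List.filter (fun j => pvClose lim pp.2 (PySem.List.pyGetD pos j [])) (PySem.List.sorted (pvCand (pvBuildCells lim pos) (pvCell lim pp.2)) (fun x => x) false)).map (fun j => [length + pp.1, length + j]))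
      [] (fun acc pp _ => PySem.List.foldl_append_if _ _ _ _)
    rw [hA]
    rw [hB]
    rw [PySem.List.foldl_append_eq_flatMap]
    rw [PySem.List.foldl_append_eq_flatMap]
    rw [List.nil_append, List.nil_append]
    rw [PySem.List.enumerate_eq_map_pyRange (d := [])]
    rw [List.flatMap_map]
    refine congrArg (fun f => List.flatMap f (PySem.List.pyRange 0 (pos.length : Int) 1)) (funext fun j => ?_)
    rw [pvRow_eq lim pos hx hy hz]

-- ===== VERDICT (by name: the statement is the Claim_ definition above) =====
theorem match_samples_spec : Claim_equal_match_samples := by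
  intro length pos lim _ _
  unfold Spec_match_samples
  exact pvMain_eq length pos lim
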